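-- pv_equiv track=rewrite | github.com/ssoto/adventofcode-2017 | day9/puzzle.py | clear_input
-- ===== SOURCE A (Python) =====
-- def clear_input(stream):
--     cleared_input = ''
--     garbage_mode = False
--     ignored = False
--     for char in stream:
--         if ignored:
--             ignored = False
--             continue
--
--         if char == '<':
--             garbage_mode = True
--         elif char == '>':
--             garbage_mode = False
--         elif char == '!':
--             ignored = True
--         elif not garbage_mode:
--             cleared_input += char
--     return cleared_input
-- ===== SOURCE B (Python) =====
-- def clear_input(stream):
--     # pass 1: remove '!'-escaped pairs (a lone trailing '!' escapes nothing and is dropped)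
--     unescaped = []
--     i, n = 0, len(stream)
--     while i < n:
--         if stream[i] == '!':
--             i += 2
--         else:
--             unescaped.append(stream[i])
--             i += 1
--     # pass 2: remove garbage groups '<...>' (an unclosed '<' swallows the rest)
--     kept = []
--     i, n = 0, len(unescaped)
--     while i < n:
--         if unescaped[i] == '<':
--             i += 1
--             while i < n and unescaped[i] != '>':
--                 i += 1
--             i += 1
--         else:
--             kept.append(unescaped[i])
--             i += 1
--     # pass 3: drop stray '>' outside garbage
--     return ''.join(c for c in kept if c != '>')
-- ===== Notes on version B (the rewrite author's own statement) =====
-- stated objective: simpler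
-- what changed: Replaced the single-scan state machine with three boolean flags by three independent passes: first strip the escape pairs, then strip whole garbage groups, then drop stray closing brackets.
import Mathlib
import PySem

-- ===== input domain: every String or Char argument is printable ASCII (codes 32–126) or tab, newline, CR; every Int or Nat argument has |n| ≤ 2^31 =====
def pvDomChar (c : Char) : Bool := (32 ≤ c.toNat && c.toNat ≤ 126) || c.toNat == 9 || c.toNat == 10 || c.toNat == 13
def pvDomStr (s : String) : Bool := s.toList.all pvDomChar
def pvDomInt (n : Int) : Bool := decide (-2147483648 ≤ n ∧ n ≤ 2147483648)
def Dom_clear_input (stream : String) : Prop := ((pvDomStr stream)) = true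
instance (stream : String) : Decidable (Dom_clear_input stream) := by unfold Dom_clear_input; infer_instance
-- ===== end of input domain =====

-- B replaces A's one-pass three-flag state machine by three independent passes
-- (strip escape pairs, then strip whole garbage groups, then drop stray closers);
-- objective: simpler, each pass does one thing.

-- ===== PORT A =====
-- the for-loop with state (cleared_input, garbage_mode, ignored), step for step
def clearLoop : List Char → String → Bool → Bool → String
  | [], acc, _, _ => acc
  | c :: rest, acc, garbage, ignored =>
    if ignored then clearLoop rest acc garbage false
    else if c = '<' then clearLoop rest acc true ignored
    else if c = '>' then clearLoop rest acc false ignored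
    else if c = '!' then clearLoop rest acc garbage true
    else if !garbage then clearLoop rest (acc.push c) garbage ignored
    else clearLoop rest acc garbage ignored

def clear_input (stream : String) : String :=
  clearLoop stream.toList "" false false

-- ===== PORT B =====
-- pass 1 of Source B: remove '!'-escaped pairs (a lone trailing '!' escapes nothing and is dropped)
def unescape : List Char → List Char
  | [] => []
  | [c] => if c = '!' then [] else [c]
  | c :: d :: rest => if c = '!' then unescape rest else c :: unescape (d :: rest)

-- inner while of pass 2: advance past the closing '>' (or to the end)
def skipGarbage : List Char → List Char
  | [] => []
  | c :: rest => if c = '>' then rest else skipGarbage rest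

theorem skipGarbage_length_le : ∀ (l : List Char), (skipGarbage l).length ≤ l.length := by
  intro l; induction l with
  | nil => simp [skipGarbage]
  | cons c rest ih => simp only [skipGarbage]; split_ifs <;> simp; omega

-- pass 2 of Source B: remove garbage groups '<…>' (an unclosed '<' swallows the rest)
def dropGroups : List Char → List Char
  | [] => []
  | c :: rest =>
    if c = '<' then dropGroups (skipGarbage rest) else c :: dropGroups rest
termination_by l => l.length
decreasing_by
  · exact Nat.lt_succ_of_le (skipGarbage_length_le rest)
  · simp

def clear_input_alt (stream : String) : String :=
  String.ofList ((dropGroups (unescape stream.toList)).filter (· ≠ '>'))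

-- ===== PRECONDITION & SPEC =====
def Spec_clear_input (stream : String) (out : String) : Prop := out = clear_input_alt stream
instance (stream : String) (out : String) : Decidable (Spec_clear_input stream out) := by unfold Spec_clear_input; infer_instance

-- ===== CLAIM (what is proved, stated in full; the proofs are below) =====
def Claim_equal_clear_input : Prop := ∀ (stream : String), Dom_clear_input stream → Spec_clear_input stream (clear_input stream)

-- ===== LEMMAS AND PROOFS =====

-- the two machine states vs. the three-pass pipeline, by strong induction on length
theorem clearLoop_eq : ∀ (n : ℕ) (cs : List Char), cs.length ≤ n → ∀ (acc : String),
    clearLoop cs acc false false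
      = acc ++ String.ofList ((dropGroups (unescape cs)).filter (· ≠ '>')) ∧
    clearLoop cs acc true false
      = acc ++ String.ofList ((dropGroups (skipGarbage (unescape cs))).filter (· ≠ '>')) := by
  intro n
  induction n with
  | zero =>
    intro cs hlen acc
    have : cs = [] := List.eq_nil_of_length_eq_zero (Nat.le_zero.mp hlen)
    subst this
    constructor <;> (rw [← String.toList_inj]; simp [clearLoop, unescape, dropGroups, skipGarbage])
  | succ n ih =>
    intro cs hlen acc
    match cs with
    | [] =>
      constructor <;> (rw [← String.toList_inj]; simp [clearLoop, unescape, dropGroups, skipGarbage])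
    | c :: rest =>
      have hr : rest.length ≤ n := by simpa using Nat.lt_succ_iff.mp (Nat.lt_of_lt_of_le (by simp) hlen)
      by_cases hbang : c = '!'
      · subst hbang
        match rest with
        | [] =>
          constructor <;>
            (rw [← String.toList_inj]; simp [clearLoop, unescape, dropGroups, skipGarbage])
        | d :: r =>
          have hr2 : r.length ≤ n := le_trans (by simp) hr
          constructor
          · rw [show clearLoop ('!' :: d :: r) acc false false = clearLoop r acc false false by
              simp [clearLoop]]
            rw [(ih r hr2 acc).1]; simp [unescape]
          · rw [show clearLoop ('!' :: d :: r) acc true false = clearLoop r acc true false by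
              simp [clearLoop]]
            rw [(ih r hr2 acc).2]; simp [unescape]
      · have hu : unescape (c :: rest) = c :: unescape rest := by
          match rest with
          | [] => simp [unescape, hbang]
          | d :: r => simp [unescape, hbang]
        by_cases hlt : c = '<'
        · subst hlt
          constructor
          · rw [show clearLoop ('<' :: rest) acc false false = clearLoop rest acc true false by
              simp [clearLoop]]
            rw [(ih rest hr acc).2, hu]; simp [dropGroups]
          · rw [show clearLoop ('<' :: rest) acc true false = clearLoop rest acc true false by
              simp [clearLoop]]
            rw [(ih rest hr acc).2, hu]; simp [skipGarbage]
        · by_cases hgt : c = '>'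
          · subst hgt
            constructor
            · rw [show clearLoop ('>' :: rest) acc false false = clearLoop rest acc false false by
                simp [clearLoop]]
              rw [(ih rest hr acc).1, hu]; simp [dropGroups]
            · rw [show clearLoop ('>' :: rest) acc true false = clearLoop rest acc false false by
                simp [clearLoop]]
              rw [(ih rest hr acc).1, hu]; simp [skipGarbage]
          · constructor
            · rw [show clearLoop (c :: rest) acc false false = clearLoop rest (acc.push c) false false by
                simp [clearLoop, hlt, hgt, hbang]]
              rw [(ih rest hr (acc.push c)).1, hu]
              rw [← String.toList_inj]; simp [dropGroups, hlt, hgt]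
            · rw [show clearLoop (c :: rest) acc true false = clearLoop rest acc true false by
                simp [clearLoop, hlt, hgt, hbang]]
              rw [(ih rest hr acc).2, hu]; simp [skipGarbage, hgt]

-- ===== VERDICT (by name: the statement is the Claim_ definition above) =====
theorem clear_input_spec : Claim_equal_clear_input := by
  intro stream _
  unfold Spec_clear_input clear_input clear_input_alt
  rw [(clearLoop_eq stream.toList.length stream.toList le_rfl "").1]
  rw [← String.toList_inj]; simp
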